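-- pv_equiv track=rewrite | github.com/GundalaNikhil/DSA | regenerate_greedy_tests.py | solve_grd010
-- ===== SOURCE A (Python) =====
-- import heapq
--
-- def solve_grd010(k, queues):
--     res = []
--     pq = []
--     idx_list = [0] * k
--     for i, q in enumerate(queues):
--         if q: heapq.heappush(pq, (q[0], i))
--     lv, ct = None, 0
--     while pq:
--         v, qi = heapq.heappop(pq)
--         if res and v == lv and ct == 2:
--             if not pq: break
--             tmp = [(v, qi)]
--             v2, q2 = heapq.heappop(pq)
--             while v2 == lv:
--                 tmp.append((v2, q2))
--                 if not pq: v2 = None; break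
--                 v2, q2 = heapq.heappop(pq)
--             if v2 is None: break
--             res.append(v2); lv, ct = v2, 1
--             idx_list[q2] += 1
--             if idx_list[q2] < len(queues[q2]): heapq.heappush(pq, (queues[q2][idx_list[q2]], q2))
--             for x in tmp: heapq.heappush(pq, x)
--         else:
--             res.append(v)
--             if v == lv: ct += 1
--             else: lv, ct = v, 1
--             idx_list[qi] += 1
--             if idx_list[qi] < len(queues[qi]): heapq.heappush(pq, (queues[qi][idx_list[qi]], qi))
--     return " ".join(map(str, res))
-- ===== SOURCE B (Python) =====
-- def solve_grd010(k, queues):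
--     # Heap-free rewrite: keep one cursor per queue and, each step, scan the
--     # current frontier once for the overall minimum and for the minimum whose
--     # value differs from the last emitted value; no heap, no borrow/push-back.
--     n = len(queues)
--     ptr = [0] * n
--     out = []
--     lv, ct = None, 0
--     while True:
--         best = None
--         alt = None
--         for i in range(n):
--             p = ptr[i]
--             if p < len(queues[i]):
--                 c = (queues[i][p], i)
--                 if best is None or c < best:
--                     best = c
--                 if c[0] != lv and (alt is None or c < alt):
--                     alt = c
--         if best is None:
--             break
--         if ct == 2 and best[0] == lv:
--             if alt is None:
--                 break
--             best = alt
--             lv, ct = alt[0], 1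
--         elif best[0] == lv:
--             ct += 1
--         else:
--             lv, ct = best[0], 1
--         out.append(best[0])
--         ptr[best[1]] += 1
--     return " ".join(map(str, out))
-- ===== Notes on version B (the rewrite author's own statement) =====
-- stated objective: simpler
-- what changed: B drops the heap and the blocked-case pop/buffer/push-back dance entirely: it keeps one cursor per queue and, each step, scans the frontier once for the overall minimum and for the minimum with a different value than the last emitted one, so the 'third consecutive' case is just picking the second candidate.
-- outside the precondition, e.g. on solve_grd010(1, [[1, 1, 1], [1]]): A returns '1 1', B returns '1 1'
import Mathlib
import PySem

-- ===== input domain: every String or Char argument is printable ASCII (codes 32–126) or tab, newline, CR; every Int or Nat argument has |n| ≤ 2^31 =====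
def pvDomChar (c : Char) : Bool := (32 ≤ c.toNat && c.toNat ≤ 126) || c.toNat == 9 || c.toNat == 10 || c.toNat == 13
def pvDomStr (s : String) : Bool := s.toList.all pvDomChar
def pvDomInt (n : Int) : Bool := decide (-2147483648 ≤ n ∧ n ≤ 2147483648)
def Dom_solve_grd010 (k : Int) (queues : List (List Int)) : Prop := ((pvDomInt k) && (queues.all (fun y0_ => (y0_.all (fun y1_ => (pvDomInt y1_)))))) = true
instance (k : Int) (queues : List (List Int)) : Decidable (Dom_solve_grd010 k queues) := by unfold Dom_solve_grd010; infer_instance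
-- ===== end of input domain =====

-- B replaces A's heap (and its blocked-case pop/buffer/push-back loop) by one cursor per
-- queue and a single frontQ scan per emitted element: simpler, not faster.

-- ===== PORT A =====

-- Python tuple comparison (v, i) <= (v', i') / < on pairs of ints.
def pyLe (a b : Int × Int) : Bool := decide (a.1 < b.1 ∨ (a.1 = b.1 ∧ a.2 ≤ b.2))
def pyLt (a b : Int × Int) : Bool := decide (a.1 < b.1 ∨ (a.1 = b.1 ∧ a.2 < b.2))

-- idx_list[i] += 1 (out-of-range would raise IndexError in Python; Pre_ excludes that).
def bumpAt (l : List Int) (i : Int) : List Int :=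
  if 0 ≤ i ∧ i.toNat < l.length then l.set i.toNat (l.getD i.toNat 0 + 1) else l

-- Exact model of heapq.heappop's RESULT on this heap: all stored pairs are totally
-- ordered and pairwise distinct (one entry per queue index), so heappop returns the
-- minimum pair and removes it; the heap itself is modelled as an unordered list.
def heapMin (x : Int × Int) (xs : List (Int × Int)) : Int × Int :=
  xs.foldl (fun m c => if pyLe m c then m else c) x

-- the inner `while v2 == lv` borrow loop of A (fuel = current heap size)
def innerA : Nat → List (Int × Int) → Int → List (Int × Int) →
    Option ((Int × Int) × List (Int × Int) × List (Int × Int))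
  | 0, _, _, _ => none
  | f + 1, pq, lv, tmp =>
    match pq with
    | [] => none
    | x :: xs =>
      let m := heapMin x xs
      let rest := (x :: xs).erase m
      if m.1 = lv then
        if rest = [] then none
        else innerA f rest lv (tmp ++ [m])
      else some (m, tmp, rest)

-- the outer `while pq` loop of A
def loopA (queues : List (List Int)) :
    Nat → List (Int × Int) → List Int → List Int → Option Int → Int → List Int
  | 0, _, _, res, _, _ => res
  | f + 1, pq, idx, res, lv, ct =>
    match pq with
    | [] => res
    | x :: xs =>
      let m := heapMin x xs
      let pq1 := (x :: xs).erase m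
      if res ≠ [] ∧ some m.1 = lv ∧ ct = 2 then
        if pq1 = [] then res
        else
          -- the Python compares v2 against lv, which here equals m.1
          match innerA pq1.length pq1 m.1 [m] with
          | none => res
          | some (m2, tmp, rest) =>
            let res' := res ++ [m2.1]
            let idx' := bumpAt idx m2.2
            let q2l := queues.getD m2.2.toNat []
            let nxt := idx'.getD m2.2.toNat 0
            let pqA := if nxt < (q2l.length : Int) then (q2l.getD nxt.toNat 0, m2.2) :: rest else rest
            let pq' := tmp.foldl (fun p t => t :: p) pqA
            loopA queues f pq' idx' res' (some m2.1) 1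
      else
        let res' := res ++ [m.1]
        let lvct := if some m.1 = lv then (lv, ct + 1) else (some m.1, (1 : Int))
        let idx' := bumpAt idx m.2
        let ql := queues.getD m.2.toNat []
        let nxt := idx'.getD m.2.toNat 0
        let pq' := if nxt < (ql.length : Int) then (ql.getD nxt.toNat 0, m.2) :: pq1 else pq1
        loopA queues f pq' idx' res' lvct.1 lvct.2

def solve_grd010 (k : Int) (queues : List (List Int)) : String :=
  let idx0 : List Int := List.replicate k.toNat 0
  let pq0 : List (Int × Int) := (List.range queues.length).foldl
    (fun p i =>
      match (queues.getD i []).head? with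
      | some h => (h, (i : Int)) :: p
      | none => p) []
  -- the while loop runs at most one iteration per element; fuel = total elements + 1
  let res := loopA queues ((queues.map List.length).sum + 1) pq0 idx0 [] none 0
  PySem.Str.join " " (res.map PySem.Int.toStr)

-- ===== PORT B =====

-- body of B's `for i in range(n)` frontQ scan: acc = (best, alt)
def frontStep (queues : List (List Int)) (lv : Option Int) (ptr : List Int)
    (acc : Option (Int × Int) × Option (Int × Int)) (i : Nat) :
    Option (Int × Int) × Option (Int × Int) :=
  let p := ptr.getD i 0
  let q := queues.getD i []
  if p < (q.length : Int) then
    let c : Int × Int := (q.getD p.toNat 0, (i : Int))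
    let best := match acc.1 with
      | none => some c
      | some b => if pyLt c b then some c else some b
    let alt :=
      if some c.1 ≠ lv then
        match acc.2 with
        | none => some c
        | some a => if pyLt c a then some c else some a
      else acc.2
    (best, alt)
  else acc

-- B's `while True` loop
def loopB (queues : List (List Int)) :
    Nat → List Int → List Int → Option Int → Int → List Int
  | 0, _, out, _, _ => out
  | f + 1, ptr, out, lv, ct =>
    let acc := (List.range queues.length).foldl (frontStep queues lv ptr) (none, none)
    match acc.1 with
    | none => out
    | some b =>
      if ct = 2 ∧ some b.1 = lv then
        match acc.2 with
        | none => out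
        | some a => loopB queues f (bumpAt ptr a.2) (out ++ [a.1]) (some a.1) 1
      else if some b.1 = lv then
        loopB queues f (bumpAt ptr b.2) (out ++ [b.1]) lv (ct + 1)
      else
        loopB queues f (bumpAt ptr b.2) (out ++ [b.1]) (some b.1) 1

def solve_grd010_alt (k : Int) (queues : List (List Int)) : String :=
  -- the loop emits at most one element per iteration; fuel = total elements + 1
  let out := loopB queues ((queues.map List.length).sum + 1)
    (List.replicate queues.length 0) [] none 0
  PySem.Str.join " " (out.map PySem.Int.toStr)

-- ===== PRECONDITION & SPEC =====
-- Pre_ excludes inputs where some NONEMPTY queue sits at an index ≥ k: A's idx_list has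
-- length k, so on such inputs A in general raises IndexError (on rare such inputs an
-- early break lets A return before touching the bad index — see the cite); B ignores k.
def Pre_solve_grd010 (k : Int) (queues : List (List Int)) : Prop :=
  ∀ i, i < queues.length → queues.getD i [] ≠ [] → (i : Int) < k
instance (k : Int) (queues : List (List Int)) : Decidable (Pre_solve_grd010 k queues) := by
  unfold Pre_solve_grd010; infer_instance

def pvWitness_solve_grd010 : Int × List (List Int) := (3, [[1, 1, 2], [1, 3], [2]])

def Spec_solve_grd010 (k : Int) (queues : List (List Int)) (out : String) : Prop :=
  out = solve_grd010_alt k queues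
instance (k : Int) (queues : List (List Int)) (out : String) :
    Decidable (Spec_solve_grd010 k queues out) := by unfold Spec_solve_grd010; infer_instance

-- ===== CLAIM (what is proved, stated in full; the proofs are below) =====
def Claim_equal_solve_grd010 : Prop := ∀ (k : Int) (queues : List (List Int)),
  Dom_solve_grd010 k queues → Pre_solve_grd010 k queues →
  Spec_solve_grd010 k queues (solve_grd010 k queues)

-- ===== LEMMAS AND PROOFS =====

def fcell (queues : List (List Int)) (ptr : List Int) (i : Nat) : Option (Int × Int) :=
  let p := ptr.getD i 0
  let q := queues.getD i []
  if p < (q.length : Int) then some (q.getD p.toNat 0, (i : Int)) else none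

def frontQ (queues : List (List Int)) (ptr : List Int) : List (Int × Int) :=
  (List.range queues.length).filterMap (fcell queues ptr)

def minFrom (acc : Option (Int × Int)) (l : List (Int × Int)) : Option (Int × Int) :=
  l.foldl (fun a c => match a with
    | none => some c
    | some b => if pyLt c b then some c else some b) acc

theorem pyLe_refl (a : Int × Int) : pyLe a a = true := by
  simp [pyLe]

theorem pyLe_total (a b : Int × Int) : pyLe a b = true ∨ pyLe b a = true := by
  obtain ⟨a1, a2⟩ := a; obtain ⟨b1, b2⟩ := b
  simp only [pyLe, decide_eq_true_eq]
  omega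

theorem pyLe_trans {a b c : Int × Int} (h1 : pyLe a b = true) (h2 : pyLe b c = true) :
    pyLe a c = true := by
  obtain ⟨a1, a2⟩ := a; obtain ⟨b1, b2⟩ := b; obtain ⟨c1, c2⟩ := c
  simp only [pyLe, decide_eq_true_eq] at *; omega

theorem pyLe_antisymm {a b : Int × Int} (h1 : pyLe a b = true) (h2 : pyLe b a = true) :
    a = b := by
  obtain ⟨a1, a2⟩ := a; obtain ⟨b1, b2⟩ := b
  simp only [pyLe, decide_eq_true_eq] at h1 h2
  simp only [Prod.mk.injEq]; constructor <;> omega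

theorem pyLt_false_iff (a b : Int × Int) : pyLt a b = false ↔ pyLe b a = true := by
  obtain ⟨a1, a2⟩ := a; obtain ⟨b1, b2⟩ := b
  simp only [pyLt, pyLe, decide_eq_true_eq, decide_eq_false_iff_not]; omega

theorem pyLt_le {a b : Int × Int} (h : pyLt a b = true) : pyLe a b = true := by
  obtain ⟨a1, a2⟩ := a; obtain ⟨b1, b2⟩ := b
  simp only [pyLt, pyLe, decide_eq_true_eq] at *; omega

theorem pyLe_fst {a b : Int × Int} (h : pyLe a b = true) : a.1 ≤ b.1 := by
  obtain ⟨a1, a2⟩ := a; obtain ⟨b1, b2⟩ := b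
  simp only [pyLe, decide_eq_true_eq] at h; simp; omega

theorem heapMin_cons (x c : Int × Int) (cs : List (Int × Int)) :
    heapMin x (c :: cs) = heapMin (if pyLe x c then x else c) cs := rfl

theorem heapMin_spec (x : Int × Int) (xs : List (Int × Int)) :
    heapMin x xs ∈ x :: xs ∧ ∀ y ∈ x :: xs, pyLe (heapMin x xs) y = true := by
  induction xs generalizing x with
  | nil =>
    constructor
    · simp [heapMin]
    · intro y hy; simp [heapMin] at hy ⊢; subst hy; exact pyLe_refl _
  | cons c cs ih =>
    rw [heapMin_cons]
    obtain ⟨hmem, hmin⟩ := ih (if pyLe x c then x else c)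
    have haccx : pyLe (if pyLe x c then x else c) x = true ∧
        pyLe (if pyLe x c then x else c) c = true := by
      by_cases h : pyLe x c = true
      · simp [h, pyLe_refl]
      · rcases pyLe_total x c with h' | h'
        · exact absurd h' h
        · simp [h, h', pyLe_refl]
    constructor
    · rw [List.mem_cons] at hmem
      rcases hmem with h | h
      · by_cases hxc : pyLe x c = true
        · rw [if_pos hxc] at h ⊢; simp [h]
        · rw [if_neg hxc] at h ⊢; simp [h]
      · simp [List.mem_cons, h]
    · intro y hy
      simp only [List.mem_cons] at hy
      have hma : pyLe (heapMin (if pyLe x c then x else c) cs) (if pyLe x c then x else c)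
          = true := hmin _ List.mem_cons_self
      rcases hy with rfl | rfl | h
      · exact pyLe_trans hma haccx.1
      · exact pyLe_trans hma haccx.2
      · exact hmin _ (List.mem_cons_of_mem _ h)

theorem minFrom_cons (b c : Int × Int) (cs : List (Int × Int)) :
    minFrom (some b) (c :: cs) = minFrom (if pyLt c b then some c else some b) cs := by
  simp only [minFrom, List.foldl_cons]

theorem minFrom_acc_spec (l : List (Int × Int)) (b : Int × Int) :
    ∃ m, minFrom (some b) l = some m ∧ (m = b ∨ m ∈ l) ∧ pyLe m b = true ∧
      ∀ x ∈ l, pyLe m x = true := by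
  induction l generalizing b with
  | nil => exact ⟨b, rfl, Or.inl rfl, pyLe_refl b, by simp⟩
  | cons c cs ih =>
    by_cases hcb : pyLt c b = true
    · obtain ⟨m, hm, hmem, hle, hall⟩ := ih c
      refine ⟨m, ?_, ?_, pyLe_trans hle (pyLt_le hcb), ?_⟩
      · rw [minFrom_cons, if_pos hcb]; exact hm
      · rcases hmem with rfl | h
        · exact Or.inr (by simp)
        · exact Or.inr (by simp [h])
      · intro x hx; simp only [List.mem_cons] at hx
        rcases hx with rfl | h
        · exact hle
        · exact hall _ h
    · obtain ⟨m, hm, hmem, hle, hall⟩ := ih b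
      have hbc : pyLe b c = true := (pyLt_false_iff c b).mp (by simpa using hcb)
      refine ⟨m, ?_, ?_, hle, ?_⟩
      · rw [minFrom_cons, if_neg hcb]; exact hm
      · rcases hmem with rfl | h
        · exact Or.inl rfl
        · exact Or.inr (by simp [h])
      · intro x hx; simp only [List.mem_cons] at hx
        rcases hx with rfl | h
        · exact pyLe_trans hle hbc
        · exact hall _ h

theorem minFrom_none_cons (c : Int × Int) (cs : List (Int × Int)) :
    minFrom none (c :: cs) = minFrom (some c) cs := by
  simp only [minFrom, List.foldl_cons]

theorem minFrom_none_eq_none_iff (l : List (Int × Int)) : minFrom none l = none ↔ l = [] := by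
  cases l with
  | nil => simp [minFrom]
  | cons c cs =>
    obtain ⟨m, hm, _, _, _⟩ := minFrom_acc_spec cs c
    rw [minFrom_none_cons, hm]
    simp

theorem minFrom_spec {l : List (Int × Int)} {m : Int × Int} (h : minFrom none l = some m) :
    m ∈ l ∧ ∀ x ∈ l, pyLe m x = true := by
  cases l with
  | nil => simp [minFrom] at h
  | cons c cs =>
    obtain ⟨m', hm', hmem, hle, hall⟩ := minFrom_acc_spec cs c
    rw [minFrom_none_cons, hm'] at h
    injection h with h; subst h
    constructor
    · rcases hmem with rfl | hm
      · simp
      · simp [hm]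
    · intro x hx; simp only [List.mem_cons] at hx
      rcases hx with rfl | hx
      · exact hle
      · exact hall _ hx

def step1 (a : Option (Int × Int)) (c : Int × Int) : Option (Int × Int) :=
  match a with
  | none => some c
  | some b => if pyLt c b then some c else some b

theorem frontStep_eq (queues : List (List Int)) (lv : Option Int) (ptr : List Int)
    (acc : Option (Int × Int) × Option (Int × Int)) (i : Nat) :
    frontStep queues lv ptr acc i =
      match fcell queues ptr i with
      | none => acc
      | some c => (step1 acc.1 c, if some c.1 ≠ lv then step1 acc.2 c else acc.2) := by
  simp only [frontStep, fcell, step1]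
  by_cases h : (ptr.getD i 0) < (((queues.getD i []).length : Int))
  · rw [if_pos h, if_pos h]
  · rw [if_neg h, if_neg h]

theorem minFrom_step (a : Option (Int × Int)) (c : Int × Int) (l : List (Int × Int)) :
    minFrom a (c :: l) = minFrom (step1 a c) l := by
  cases a <;> simp only [minFrom, List.foldl_cons, step1]

theorem foldFront_gen (queues : List (List Int)) (lv : Option Int) (ptr : List Int) :
    ∀ (l : List Nat) (acc : Option (Int × Int) × Option (Int × Int)),
    l.foldl (frontStep queues lv ptr) acc =
      (minFrom acc.1 (l.filterMap (fcell queues ptr)),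
       minFrom acc.2 ((l.filterMap (fcell queues ptr)).filter (fun c => decide (some c.1 ≠ lv)))) := by
  intro l
  induction l with
  | nil => intro acc; simp [minFrom]
  | cons i l ih =>
    intro acc
    rw [List.foldl_cons, ih, frontStep_eq]
    cases hcell : fcell queues ptr i with
    | none => simp [hcell]
    | some c =>
      simp only [List.filterMap_cons, hcell]
      by_cases hlv : some c.1 ≠ lv
      · rw [if_pos hlv, List.filter_cons, if_pos (by simpa using hlv), minFrom_step, minFrom_step]
      · rw [if_neg hlv, List.filter_cons, if_neg (by simpa using hlv), minFrom_step]

theorem foldFront_eq (queues : List (List Int)) (lv : Option Int) (ptr : List Int) :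
    (List.range queues.length).foldl (frontStep queues lv ptr) (none, none) =
      (minFrom none (frontQ queues ptr),
       minFrom none ((frontQ queues ptr).filter (fun c => decide (some c.1 ≠ lv)))) := by
  rw [foldFront_gen]; rfl

theorem fcell_eq_some {queues : List (List Int)} {ptr : List Int} {i : Nat} {c : Int × Int}
    (h : fcell queues ptr i = some c) :
    c.2 = (i : Int) ∧ ptr.getD i 0 < ((queues.getD i []).length : Int) ∧
      c.1 = (queues.getD i []).getD (ptr.getD i 0).toNat 0 := by
  simp only [fcell] at h
  split at h
  · injection h with h; subst h; simp_all
  · exact absurd h (by simp)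

theorem mem_frontQ {queues : List (List Int)} {ptr : List Int} {x : Int × Int} :
    x ∈ frontQ queues ptr ↔ ∃ i, i < queues.length ∧ fcell queues ptr i = some x := by
  simp [frontQ, List.mem_filterMap, List.mem_range]

theorem filterMap_range_decomp (g : Nat → Option (Int × Int)) :
    ∀ n j, j < n → ∃ L R, (List.range n).filterMap g = L ++ (g j).toList ++ R ∧
      (∀ g' : Nat → Option (Int × Int), (∀ i, i ≠ j → g' i = g i) →
        (List.range n).filterMap g' = L ++ (g' j).toList ++ R) ∧
      (∀ x ∈ L, ∃ i, i < j ∧ g i = some x) := by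
  intro n
  induction n with
  | zero => intro j hj; omega
  | succ n ih =>
    intro j hj
    by_cases hjn : j = n
    · subst hjn
      refine ⟨(List.range j).filterMap g, [], ?_, ?_, ?_⟩
      · simp [List.range_succ, List.filterMap_append]
        cases hgj : g j <;> simp [hgj]
      · intro g' hg'
        rw [List.range_succ, List.filterMap_append]
        have : (List.range j).filterMap g' = (List.range j).filterMap g := by
          apply List.filterMap_congr
          intro i hi; exact hg' i (by simp at hi; omega)
        simp [this]
        cases hgj : g' j <;> simp [hgj]
      · intro x hx
        rw [List.mem_filterMap] at hx
        obtain ⟨i, hi, hgi⟩ := hx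
        exact ⟨i, by simp at hi; omega, hgi⟩
    · obtain ⟨L, R, h1, h2, h3⟩ := ih j (by omega)
      refine ⟨L, R ++ (g n).toList, ?_, ?_, h3⟩
      · rw [List.range_succ, List.filterMap_append, h1]
        simp only [List.append_assoc]
        cases hgn : g n <;> simp [hgn]
      · intro g' hg'
        rw [List.range_succ, List.filterMap_append, h2 g' hg']
        have hgg : g' n = g n := hg' n (by omega)
        simp only [List.append_assoc]
        cases hgn : g n <;> simp [hgn, hgg ▸ hgn]

theorem bumpAt_length (l : List Int) (i : Int) : (bumpAt l i).length = l.length := by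
  unfold bumpAt; split <;> simp

theorem bumpAt_getD_self {l : List Int} {j : Nat} (h : j < l.length) :
    (bumpAt l (j : Int)).getD j 0 = l.getD j 0 + 1 := by
  unfold bumpAt
  rw [if_pos (by simp [h])]
  simp [List.getD_eq_getElem?_getD, h]

theorem bumpAt_getD_ne {l : List Int} {j i : Nat} (hij : i ≠ j) :
    (bumpAt l (j : Int)).getD i 0 = l.getD i 0 := by
  unfold bumpAt
  split
  · simp [List.getD_eq_getElem?_getD]
    rw [List.getElem?_set_ne (by simpa using fun h => hij h.symm)]
  · rfl

theorem getD_replicate_zero (n i : Nat) : (List.replicate n (0 : Int)).getD i 0 = 0 := by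
  by_cases h : i < n
  · simp [List.getD_eq_getElem?_getD, List.getElem?_replicate, h]
  · rw [List.getD_eq_getElem?_getD, List.getElem?_eq_none (by simp; omega)]; rfl

theorem frontQ_bump {queues : List (List Int)} {ptr : List Int} {j : Nat} {c : Int × Int}
    (hj : j < queues.length) (hc : fcell queues ptr j = some c) :
    (frontQ queues (bumpAt ptr (j : Int))).Perm
      ((fcell queues (bumpAt ptr (j : Int)) j).toList ++ (frontQ queues ptr).erase c) := by
  obtain ⟨L, R, h1, h2, h3⟩ := filterMap_range_decomp (fcell queues ptr) queues.length j hj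
  have hcell' : ∀ i, i ≠ j → fcell queues (bumpAt ptr (j : Int)) i = fcell queues ptr i := by
    intro i hij; unfold fcell; rw [bumpAt_getD_ne hij]
  have h1' : frontQ queues ptr = L ++ (c :: R) := by
    rw [frontQ, h1, hc]; simp
  have h2' : frontQ queues (bumpAt ptr (j : Int)) =
      L ++ ((fcell queues (bumpAt ptr (j : Int)) j).toList ++ R) := by
    rw [frontQ, h2 _ hcell']; simp
  have hcnotL : c ∉ L := by
    intro hmem
    obtain ⟨i, hij, hgi⟩ := h3 c hmem
    have e1 := (fcell_eq_some hgi).1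
    have e2 := (fcell_eq_some hc).1
    rw [e1] at e2; omega
  have herase : (frontQ queues ptr).erase c = L ++ R := by
    rw [h1', List.erase_append_right _ hcnotL, List.erase_cons_head]
  rw [h2', herase, ← List.append_assoc, ← List.append_assoc]
  exact (List.perm_append_comm).append_right R

theorem foldl_cons_perm (l acc : List (Int × Int)) :
    (l.foldl (fun p t => t :: p) acc).Perm (l ++ acc) := by
  induction l generalizing acc with
  | nil => simp
  | cons c cs ih =>
    have h1 : ((c :: cs).foldl (fun p t => t :: p) acc) = cs.foldl (fun p t => t :: p) (c :: acc) := rfl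
    rw [h1]
    exact (ih (c :: acc)).trans List.perm_middle

theorem innerA_some {lv : Int} :
    ∀ (fuel : Nat) (pq tmp : List (Int × Int)),
      pq.length ≤ fuel →
      (∀ x ∈ pq, lv ≤ x.1) →
      (∃ x ∈ pq, x.1 ≠ lv) →
      ∃ m2 tmp' rest, innerA fuel pq lv tmp = some (m2, tmp', rest) ∧ m2 ∈ pq ∧ m2.1 ≠ lv ∧
        (∀ x ∈ pq, x.1 ≠ lv → pyLe m2 x = true) ∧ (tmp' ++ rest).Perm (tmp ++ pq.erase m2) := by
  intro fuel
  induction fuel with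
  | zero =>
    intro pq tmp hf hall hex
    have hpq : pq = [] := List.length_eq_zero_iff.mp (by omega)
    obtain ⟨x, hx, _⟩ := hex; rw [hpq] at hx; simp at hx
  | succ f ih =>
    intro pq tmp hf hall hex
    cases pq with
    | nil => obtain ⟨x, hx, _⟩ := hex; simp at hx
    | cons x xs =>
      obtain ⟨hmmem, hmmin⟩ := heapMin_spec x xs
      by_cases hmlv : (heapMin x xs).1 = lv
      · obtain ⟨y, hy, hyne⟩ := hex
        have hyne' : y ≠ heapMin x xs := fun h => hyne (by rw [h, hmlv])
        have hperm : (x :: xs).Perm (heapMin x xs :: (x :: xs).erase (heapMin x xs)) :=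
          List.perm_cons_erase hmmem
        have hymem : y ∈ (x :: xs).erase (heapMin x xs) := by
          have := (hperm.mem_iff).mp hy
          simp at this
          rcases this with h | h
          · exact absurd h hyne'
          · exact h
        have hrestne : (x :: xs).erase (heapMin x xs) ≠ [] := by
          intro h; rw [h] at hymem; simp at hymem
        have hlenr : ((x :: xs).erase (heapMin x xs)).length ≤ f := by
          rw [List.length_erase_of_mem hmmem]; simp at hf ⊢; omega
        have hallr : ∀ z ∈ (x :: xs).erase (heapMin x xs), lv ≤ z.1 :=
          fun z hz => hall z (List.mem_of_mem_erase hz)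
        obtain ⟨m2, tmp', rest', heq, hm2, hne2, hmin2, hpermtr⟩ :=
          ih ((x :: xs).erase (heapMin x xs)) (tmp ++ [heapMin x xs]) hlenr hallr ⟨y, hymem, hyne⟩
        refine ⟨m2, tmp', rest', ?_, List.mem_of_mem_erase hm2, hne2, ?_, ?_⟩
        · simp only [innerA]
          rw [if_pos hmlv, if_neg hrestne]
          exact heq
        · intro z hz hzne
          have hzne' : z ≠ heapMin x xs := fun h => hzne (by rw [h, hmlv])
          have hzmem : z ∈ (x :: xs).erase (heapMin x xs) := by
            have := (hperm.mem_iff).mp hz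
            simp at this
            rcases this with h | h
            · exact absurd h hzne'
            · exact h
          exact hmin2 z hzmem hzne
        · have hm2nem : (heapMin x xs) ≠ m2 := fun h => hne2 (by rw [← h, hmlv])
          have hec : ((heapMin x xs :: (x :: xs).erase (heapMin x xs)).erase m2) =
              heapMin x xs :: (((x :: xs).erase (heapMin x xs)).erase m2) :=
            List.erase_cons_tail (by simp [hm2nem])
          have he1 : ((x :: xs).erase m2).Perm
              (heapMin x xs :: ((x :: xs).erase (heapMin x xs)).erase m2) := by
            have h := hperm.erase m2
            rwa [hec] at h
          have heq2 : (tmp ++ [heapMin x xs]) ++ ((x :: xs).erase (heapMin x xs)).erase m2 =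
              tmp ++ (heapMin x xs :: ((x :: xs).erase (heapMin x xs)).erase m2) := by simp
          exact (heq2 ▸ hpermtr).trans ((he1.symm).append_left tmp)
      · refine ⟨heapMin x xs, tmp, (x :: xs).erase (heapMin x xs), ?_, hmmem, hmlv, ?_, ?_⟩
        · simp only [innerA]
          rw [if_neg hmlv]
        · intro z hz _; exact hmmin z hz
        · exact List.Perm.refl _

theorem innerA_none {lv : Int} :
    ∀ (fuel : Nat) (pq tmp : List (Int × Int)),
      (∀ x ∈ pq, x.1 = lv) → innerA fuel pq lv tmp = none := by
  intro fuel
  induction fuel with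
  | zero => intro pq tmp _; rfl
  | succ f ih =>
    intro pq tmp hall
    cases pq with
    | nil => rfl
    | cons x xs =>
      obtain ⟨hmmem, _⟩ := heapMin_spec x xs
      simp only [innerA]
      rw [if_pos (hall _ hmmem)]
      by_cases hr : (x :: xs).erase (heapMin x xs) = []
      · rw [if_pos hr]
      · rw [if_neg hr]
        exact ih _ _ (fun z hz => hall z (List.mem_of_mem_erase hz))

theorem init_fold_perm (queues : List (List Int)) :
    ((List.range queues.length).foldl
      (fun p i => match (queues.getD i []).head? with
        | some h => (h, (i : Int)) :: p
        | none => p) []).Perm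
      (frontQ queues (List.replicate queues.length 0)) := by
  have gen : ∀ (l : List Nat) (acc : List (Int × Int)),
      (l.foldl (fun p i => match (queues.getD i []).head? with
        | some h => (h, (i : Int)) :: p
        | none => p) acc).Perm
        ((l.filterMap (fun i => (queues.getD i []).head?.map (fun h => (h, (i : Int))))) ++ acc) := by
    intro l
    induction l with
    | nil => intro acc; simp
    | cons i l ihl =>
      intro acc
      rw [List.foldl_cons, List.filterMap_cons]
      cases hh : (queues.getD i []).head? with
      | none => simpa [hh] using ihl acc
      | some h =>
        simp only [hh, Option.map_some]
        exact (ihl _).trans List.perm_middle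
  have hcong : (List.range queues.length).filterMap
      (fun i => (queues.getD i []).head?.map (fun h => (h, (i : Int)))) =
      frontQ queues (List.replicate queues.length 0) := by
    rw [frontQ]
    apply List.filterMap_congr
    intro i _
    unfold fcell
    rw [getD_replicate_zero]
    cases hq : queues.getD i [] with
    | nil => simp
    | cons a t => simp
  have := gen (List.range queues.length) []
  rw [List.append_nil, hcong] at this
  exact this

theorem loopB_succ (queues : List (List Int)) (f : Nat) (ptr out : List Int)
    (lv : Option Int) (ct : Int) :
    loopB queues (f + 1) ptr out lv ct =
      match minFrom none (frontQ queues ptr) with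
      | none => out
      | some b =>
        if ct = 2 ∧ some b.1 = lv then
          match minFrom none ((frontQ queues ptr).filter (fun c => decide (some c.1 ≠ lv))) with
          | none => out
          | some a => loopB queues f (bumpAt ptr a.2) (out ++ [a.1]) (some a.1) 1
        else if some b.1 = lv then loopB queues f (bumpAt ptr b.2) (out ++ [b.1]) lv (ct + 1)
        else loopB queues f (bumpAt ptr b.2) (out ++ [b.1]) (some b.1) 1 := by
  simp only [loopB, foldFront_eq]

theorem advance (queues : List (List Int)) (k : Int) (ptr idx : List Int)
    (hpre : ∀ i, i < queues.length → queues.getD i [] ≠ [] → (i : Int) < k)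
    (hlen : ptr.length = queues.length) (hilen : idx.length = k.toNat)
    (hnn : ∀ i, 0 ≤ ptr.getD i 0) (hidx : ∀ i, idx.getD i 0 = ptr.getD i 0)
    {m2 : Int × Int} (hm2 : m2 ∈ frontQ queues ptr) :
    ∃ j : Nat, m2.2 = (j : Int) ∧ j < queues.length ∧ m2.2.toNat = j ∧
      fcell queues ptr j = some m2 ∧
      (∀ rest : List (Int × Int),
        (if (bumpAt idx m2.2).getD m2.2.toNat 0 < ((queues.getD m2.2.toNat []).length : Int)
          then ((queues.getD m2.2.toNat []).getD ((bumpAt idx m2.2).getD m2.2.toNat 0).toNat 0, m2.2) :: rest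
          else rest)
        = (fcell queues (bumpAt ptr (j : Int)) j).toList ++ rest) ∧
      (bumpAt ptr m2.2).length = queues.length ∧ (bumpAt idx m2.2).length = k.toNat ∧
      (∀ i, 0 ≤ (bumpAt ptr m2.2).getD i 0) ∧
      (∀ i, (bumpAt idx m2.2).getD i 0 = (bumpAt ptr m2.2).getD i 0) := by
  obtain ⟨j, hj, hcell⟩ := mem_frontQ.mp hm2
  obtain ⟨hsnd, hactive, hval⟩ := fcell_eq_some hcell
  have htn : m2.2.toNat = j := by rw [hsnd]; simp
  have hqne : queues.getD j [] ≠ [] := by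
    intro h
    rw [h] at hactive
    have h0 := hnn j
    simp only [List.length_nil] at hactive
    omega
  have hjk : j < k.toNat := by
    have := hpre j hj hqne
    omega
  have hjp : j < ptr.length := by omega
  have hji : j < idx.length := by omega
  have hidxs : (bumpAt idx m2.2).getD j 0 = ptr.getD j 0 + 1 := by
    rw [hsnd, bumpAt_getD_self hji, hidx j]
  have hptrs : (bumpAt ptr m2.2).getD j 0 = ptr.getD j 0 + 1 := by
    rw [hsnd, bumpAt_getD_self hjp]
  refine ⟨j, hsnd, hj, htn, hcell, ?_, ?_, ?_, ?_, ?_⟩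
  · intro rest
    rw [htn]
    unfold fcell
    rw [hidxs, ← hsnd]
    rw [show (bumpAt ptr m2.2).getD j 0 = ptr.getD j 0 + 1 from hptrs]
    by_cases hc : ptr.getD j 0 + 1 < ((queues.getD j []).length : Int)
    · rw [if_pos hc, if_pos hc]; simp [hsnd]
    · rw [if_neg hc, if_neg hc]; simp
  · rw [hsnd]; simp [bumpAt_length, hlen]
  · rw [hsnd]; simp [bumpAt_length, hilen]
  · intro i
    by_cases hij : i = j
    · subst hij; rw [hsnd, bumpAt_getD_self hjp]; have := hnn i; omega
    · rw [hsnd, bumpAt_getD_ne hij]; exact hnn i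
  · intro i
    by_cases hij : i = j
    · subst hij; rw [hidxs, hptrs]
    · rw [hsnd, bumpAt_getD_ne hij, bumpAt_getD_ne hij]; exact hidx i

theorem loop_eq (queues : List (List Int)) (k : Int)
    (hpre : ∀ i, i < queues.length → queues.getD i [] ≠ [] → (i : Int) < k) :
    ∀ (fuel : Nat) (pq : List (Int × Int)) (idx ptr res : List Int) (lv : Option Int) (ct : Int),
      ptr.length = queues.length →
      idx.length = k.toNat →
      (∀ i, 0 ≤ ptr.getD i 0) →
      (∀ i, idx.getD i 0 = ptr.getD i 0) →
      pq.Perm (frontQ queues ptr) →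
      (ct = 2 → res ≠ []) →
      loopA queues fuel pq idx res lv ct = loopB queues fuel ptr res lv ct := by
  intro fuel
  induction fuel with
  | zero => intro pq idx ptr res lv ct _ _ _ _ _ _; rfl
  | succ f ih =>
    intro pq idx ptr res lv ct hlen hilen hnn hidx hperm hres
    cases pq with
    | nil =>
      have hF : frontQ queues ptr = [] := List.Perm.eq_nil hperm.symm
      rw [loopB_succ, hF]
      simp [loopA, minFrom]
    | cons x xs =>
      obtain ⟨hmm, hmlb⟩ := heapMin_spec x xs
      have hpermc : (x :: xs).Perm (heapMin x xs :: (x :: xs).erase (heapMin x xs)) :=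
        List.perm_cons_erase hmm
      have hmF : heapMin x xs ∈ frontQ queues ptr := hperm.mem_iff.mp hmm
      have hFne : frontQ queues ptr ≠ [] := by intro h; rw [h] at hmF; simp at hmF
      cases hbest : minFrom none (frontQ queues ptr) with
      | none => exact absurd ((minFrom_none_eq_none_iff _).mp hbest) hFne
      | some b =>
        obtain ⟨hbF, hblb⟩ := minFrom_spec hbest
        have hbm : b = heapMin x xs :=
          pyLe_antisymm (hblb _ hmF) (hmlb b (hperm.mem_iff.mpr hbF))
        rw [loopB_succ, hbest]
        subst hbm
        dsimp only
        by_cases hcond : some (heapMin x xs).1 = lv ∧ ct = 2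
        · -- blocked branch
          have hcondA : res ≠ [] ∧ some (heapMin x xs).1 = lv ∧ ct = 2 :=
            ⟨hres hcond.2, hcond.1, hcond.2⟩
          rw [if_pos ⟨hcond.2, hcond.1⟩]
          simp only [loopA]
          rw [if_pos hcondA]
          have hlv : lv = some (heapMin x xs).1 := hcond.1.symm
          have hfiltm : (decide (some (heapMin x xs).1 ≠ lv)) = false := by
            simp [hlv]
          have hfilt : ((frontQ queues ptr).filter (fun c => decide (some c.1 ≠ lv))).Perm
              (((x :: xs).erase (heapMin x xs)).filter (fun c => decide (some c.1 ≠ lv))) := by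
            have h1 := (hperm.symm.trans hpermc).filter (fun c => decide (some c.1 ≠ lv))
            rwa [List.filter_cons, hfiltm, if_neg (by simp)] at h1
          by_cases hpq1 : (x :: xs).erase (heapMin x xs) = []
          · rw [if_pos hpq1]
            have : (frontQ queues ptr).filter (fun c => decide (some c.1 ≠ lv)) = [] := by
              have := hfilt
              rw [hpq1] at this
              simpa using this.eq_nil
            rw [this]
            simp [minFrom]
          · rw [if_neg hpq1]
            by_cases hex : ∃ y ∈ (x :: xs).erase (heapMin x xs), y.1 ≠ (heapMin x xs).1
            · -- a distinct value exists: A finds it through the borrow loop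
              have hall : ∀ z ∈ (x :: xs).erase (heapMin x xs), (heapMin x xs).1 ≤ z.1 :=
                fun z hz => pyLe_fst (hmlb z (List.mem_of_mem_erase hz))
              obtain ⟨m2, tmp', rest', heq, hm2, hne2, hmin2, hpermtr⟩ :=
                innerA_some ((x :: xs).erase (heapMin x xs)).length
                  ((x :: xs).erase (heapMin x xs)) [heapMin x xs] (le_refl _) hall hex
              rw [heq]
              -- B's alt is the same element
              obtain ⟨y, hy, hyne⟩ := hex
              have hyF : y ∈ (frontQ queues ptr).filter (fun c => decide (some c.1 ≠ lv)) := by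
                rw [hfilt.mem_iff, List.mem_filter]
                exact ⟨hy, by simp [hlv, hyne]⟩
              have hfne : (frontQ queues ptr).filter (fun c => decide (some c.1 ≠ lv)) ≠ [] := by
                intro h; rw [h] at hyF; simp at hyF
              cases halt : minFrom none ((frontQ queues ptr).filter (fun c => decide (some c.1 ≠ lv))) with
              | none => exact absurd ((minFrom_none_eq_none_iff _).mp halt) hfne
              | some a =>
                obtain ⟨haF, halb⟩ := minFrom_spec halt
                have ham2 : a = m2 := by
                  have h1 : a ∈ (x :: xs).erase (heapMin x xs) ∧ a.1 ≠ (heapMin x xs).1 := by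
                    have := (hfilt.mem_iff).mp haF
                    rw [List.mem_filter] at this
                    exact ⟨this.1, by simpa [hlv] using this.2⟩
                  have h2 : m2 ∈ (frontQ queues ptr).filter (fun c => decide (some c.1 ≠ lv)) := by
                    rw [hfilt.mem_iff, List.mem_filter]
                    exact ⟨hm2, by simp [hlv, hne2]⟩
                  exact pyLe_antisymm (halb m2 h2) (hmin2 a h1.1 h1.2)
                subst ham2
                -- both recurse on equal states
                have haFQ : a ∈ frontQ queues ptr :=
                  hperm.mem_iff.mp (List.mem_of_mem_erase hm2)
                obtain ⟨j, hsnd, hj, htn, hcella, hpush, hlen', hilen', hnn', hidx'⟩ :=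
                  advance queues k ptr idx hpre hlen hilen hnn hidx haFQ
                -- new pq ~ new frontier
                have hme : (heapMin x xs) ≠ a := fun h => hne2 (by rw [← h])
                have hec : ((heapMin x xs :: (x :: xs).erase (heapMin x xs)).erase a) =
                    heapMin x xs :: (((x :: xs).erase (heapMin x xs)).erase a) :=
                  List.erase_cons_tail (by simp [hme])
                have hFe : ((frontQ queues ptr).erase a).Perm
                    (heapMin x xs :: (((x :: xs).erase (heapMin x xs)).erase a)) := by
                  have h := (hperm.symm.trans hpermc).erase a
                  rwa [hec] at h
                have hbump := frontQ_bump hj hcella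
                dsimp only
                -- the new heap is a permutation of the new frontier
                have hN := hpush rest'
                have hp1 : (tmp'.foldl (fun p t => t :: p)
                    ((fcell queues (bumpAt ptr (j : Int)) j).toList ++ rest')).Perm
                    ((fcell queues (bumpAt ptr (j : Int)) j).toList ++ (tmp' ++ rest')) := by
                  refine (foldl_cons_perm _ _).trans ?_
                  rw [← List.append_assoc, ← List.append_assoc]
                  exact (List.perm_append_comm).append_right rest'
                have hp2 : (tmp' ++ rest').Perm ((frontQ queues ptr).erase a) := by
                  refine hpermtr.trans ?_
                  have : [heapMin x xs] ++ ((x :: xs).erase (heapMin x xs)).erase a =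
                      heapMin x xs :: ((x :: xs).erase (heapMin x xs)).erase a := rfl
                  rw [this]
                  exact hFe.symm
                have hpermN : (tmp'.foldl (fun p t => t :: p)
                    ((fcell queues (bumpAt ptr (j : Int)) j).toList ++ rest')).Perm
                    (frontQ queues (bumpAt ptr (j : Int))) :=
                  (hp1.trans (hp2.append_left _)).trans hbump.symm
                rw [hN, hsnd]
                exact ih _ _ _ _ _ _ (hsnd ▸ hlen') (hsnd ▸ hilen') (hsnd ▸ hnn')
                  (hsnd ▸ hidx') hpermN (fun _ => by simp)
            · -- every remaining value equals lv: A stops, B finds no alternative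
              push_neg at hex
              rw [innerA_none _ _ _ hex]
              have : ((x :: xs).erase (heapMin x xs)).filter
                  (fun c => decide (some c.1 ≠ lv)) = [] := by
                rw [List.filter_eq_nil_iff]
                intro z hz
                simp [hlv, hex z hz]
              have hFnil : (frontQ queues ptr).filter (fun c => decide (some c.1 ≠ lv)) = [] := by
                have h := hfilt
                rw [this] at h
                simpa using h.eq_nil
              rw [hFnil]
              simp [minFrom]
        · -- normal branch
          have hcondA : ¬(res ≠ [] ∧ some (heapMin x xs).1 = lv ∧ ct = 2) := by
            intro h; exact hcond ⟨h.2.1, h.2.2⟩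
          rw [if_neg (by intro h; exact hcond ⟨h.2, h.1⟩)]
          simp only [loopA]
          rw [if_neg hcondA]
          obtain ⟨j, hsnd, hj, htn, hcellm, hpush, hlen', hilen', hnn', hidx'⟩ :=
            advance queues k ptr idx hpre hlen hilen hnn hidx hmF
          have hpermN : ∀ rest : List (Int × Int),
              rest.Perm ((frontQ queues ptr).erase (heapMin x xs)) →
              ((fcell queues (bumpAt ptr (j : Int)) j).toList ++ rest).Perm
                (frontQ queues (bumpAt ptr (j : Int))) := by
            intro rest hr
            exact ((hr.append_left _).trans (frontQ_bump hj hcellm).symm)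
          have hp1 : ((x :: xs).erase (heapMin x xs)).Perm
              ((frontQ queues ptr).erase (heapMin x xs)) := hperm.erase _
          rw [hpush ((x :: xs).erase (heapMin x xs))]
          by_cases hlv : some (heapMin x xs).1 = lv
          · rw [if_pos hlv, if_pos hlv]
            dsimp only
            rw [hsnd]
            exact ih _ _ _ _ _ _ (hsnd ▸ hlen') (hsnd ▸ hilen') (hsnd ▸ hnn') (hsnd ▸ hidx')
              (hpermN _ hp1) (fun _ => by simp)
          · rw [if_neg hlv, if_neg hlv]
            dsimp only
            rw [hsnd]
            exact ih _ _ _ _ _ _ (hsnd ▸ hlen') (hsnd ▸ hilen') (hsnd ▸ hnn') (hsnd ▸ hidx')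
              (hpermN _ hp1) (fun _ => by simp)

theorem main_final : ∀ (k : Int) (queues : List (List Int)),
    (∀ i, i < queues.length → queues.getD i [] ≠ [] → (i : Int) < k) →
    solve_grd010 k queues = solve_grd010_alt k queues := by
  intro k queues hpre
  simp only [solve_grd010, solve_grd010_alt]
  have h := loop_eq queues k hpre ((queues.map List.length).sum + 1)
    ((List.range queues.length).foldl (fun p i => match (queues.getD i []).head? with
      | some h => (h, (i : Int)) :: p | none => p) [])
    (List.replicate k.toNat 0) (List.replicate queues.length 0) [] none 0
    (by simp) (by simp) (fun i => by rw [getD_replicate_zero])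
    (fun i => by rw [getD_replicate_zero, getD_replicate_zero])
    (init_fold_perm queues) (by intro h2; norm_num at h2)
  rw [h]

-- ===== VERDICT (by name: the statement is the Claim_ definition above) =====
theorem solve_grd010_spec : Claim_equal_solve_grd010 := by
  intro k queues _ hpre
  unfold Pre_solve_grd010 at hpre
  unfold Spec_solve_grd010
  exact main_final k queues hpre
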